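-- pv_equiv track=rewrite | github.com/cesaregarza/DataPlayground | Diamonds/diamond_scraper.py | price_intify
-- ===== SOURCE A (Python) =====
-- def price_intify(string):
--     stri = ""
--     for s in string[::-1]:
--         if s.isdigit():
--             stri += s
--         elif s == "$":
--             break
--     return int(stri[::-1])
-- ===== SOURCE B (Python) =====
-- def price_intify(string):
--     tail = string.rpartition("$")[2]
--     digits = "".join(c for c in tail if c.isdigit())
--     return int(digits)
-- ===== Notes on version B (the rewrite author's own statement) =====
-- stated objective: simpler
-- what changed: Replaces the right-to-left character loop with accumulator and break by a boundary step (rpartition on the last '$') followed by a forward digit filter and a single int() call.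
-- outside the precondition, e.g. on price_intify('$'): A raises ValueError, B raises ValueError
import Mathlib
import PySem

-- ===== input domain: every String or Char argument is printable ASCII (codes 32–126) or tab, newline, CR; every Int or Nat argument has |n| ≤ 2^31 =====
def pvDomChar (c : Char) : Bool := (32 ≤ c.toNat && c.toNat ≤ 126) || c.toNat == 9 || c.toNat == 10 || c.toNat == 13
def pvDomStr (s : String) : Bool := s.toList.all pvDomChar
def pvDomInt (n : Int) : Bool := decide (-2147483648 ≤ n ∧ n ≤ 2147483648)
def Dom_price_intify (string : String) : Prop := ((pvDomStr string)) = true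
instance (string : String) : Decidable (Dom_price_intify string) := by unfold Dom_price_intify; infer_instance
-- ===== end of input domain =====

-- B replaces A's reverse scan-and-break with: tail after the last '$' (rpartition), then a forward digit filter.
-- Pre_ excludes inputs where A raises ValueError: no digit occurs after the last dollar sign.
-- ===== PORT A =====
-- the loop 'for s in string[::-1]: if s.isdigit(): stri += s; elif s == "$": break'
-- (stri is accumulated in scan order; the final stri[::-1] is the .reverse below)
def pvALoop : List Char → List Char
  | [] => []
  | c :: rest =>
    if PySem.Chars.isdigit c then c :: pvALoop rest
    else if c = '$' then []
    else pvALoop rest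

def price_intify (string : String) : Int :=
  let stri := pvALoop string.toList.reverse   -- string[::-1] is the reversed character sequence
  (PySem.Int.ofChars? stri.reverse).getD 0    -- int(stri[::-1]); none = ValueError, excluded by Pre_

-- ===== PORT B =====
-- string.rpartition("$")[2] = the characters after the last '$' (whole string if absent):
-- hand port, exact: reverse, take up to the first '$' from the right, reverse back.
def price_intify_alt (string : String) : Int :=
  let tail := (string.toList.reverse.takeWhile (· ≠ '$')).reverse
  let digits := tail.filter (fun c => PySem.Chars.isdigit c)
  (PySem.Int.ofChars? digits).getD 0          -- int(digits); none = ValueError, excluded by Pre_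

-- ===== PRECONDITION & SPEC =====
-- excluded: inputs with no digit after the last '$' — there both Pythons raise ValueError
def Pre_price_intify (string : String) : Prop :=
  (string.toList.reverse.takeWhile (· ≠ '$')).any (fun c => PySem.Chars.isdigit c) = true
instance (string : String) : Decidable (Pre_price_intify string) := by unfold Pre_price_intify; infer_instance
def pvWitness_price_intify : String := "$1,234"

def Spec_price_intify (string : String) (out : Int) : Prop := out = price_intify_alt string
instance (string : String) (out : Int) : Decidable (Spec_price_intify string out) := by unfold Spec_price_intify; infer_instance

-- ===== CLAIM (what is proved, stated in full; the proofs are below) =====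
def Claim_equal_price_intify : Prop := ∀ (string : String), Dom_price_intify string → Pre_price_intify string → Spec_price_intify string (price_intify string)

-- ===== LEMMAS AND PROOFS =====

-- ===== VERDICT (by name: the statement is the Claim_ definition above) =====
-- A's scan-and-break collects exactly the digits of the segment before the first '$' of the scanned list
theorem pvALoop_eq (l : List Char) :
    pvALoop l = (l.takeWhile (· ≠ '$')).filter (fun c => PySem.Chars.isdigit c) := by
  induction l with
  | nil => rfl
  | cons c rest ih =>
    by_cases hd : PySem.Chars.isdigit c = true
    · have hne : c ≠ '$' := by intro h; subst h; simp [PySem.Chars.isdigit] at hd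
      simp [pvALoop, hd, hne, List.takeWhile, ih]
    · by_cases hs : c = '$'
      · subst hs; simp [pvALoop, hd, List.takeWhile]
      · simp [pvALoop, hd, hs, List.takeWhile, ih]

-- ===== VERDICT (by name: the statement is the Claim_ definition above) =====
theorem price_intify_spec : Claim_equal_price_intify := by
  intro string _ _
  unfold Spec_price_intify price_intify price_intify_alt
  simp [pvALoop_eq, List.filter_reverse]
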